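-- pv_equiv track=rewrite | github.com/omidroshani/jetsocket | src/wsfabric/_core_fallback.py | parse_deflate_params
-- ===== SOURCE A (Python) =====
-- def parse_deflate_params(
--     extension_str: str,
-- ) -> tuple[bool, bool, int, int]:
--     """Parse permessage-deflate extension parameters.
--
--     Args:
--         extension_str: The Sec-WebSocket-Extensions header value.
--
--     Returns:
--         Tuple of (client_no_context_takeover, server_no_context_takeover,
--                   client_max_window_bits, server_max_window_bits).
--     """
--     client_no_context_takeover = False
--     server_no_context_takeover = False
--     client_max_window_bits = 15
--     server_max_window_bits = 15
--
--     for raw_part in extension_str.split(";"):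
--         token = raw_part.strip()
--         if token.lower() == "permessage-deflate" or not token:
--             continue
--
--         if "=" in token:
--             key, value = token.split("=", 1)
--             key = key.strip()
--             value = value.strip()
--             if key == "client_max_window_bits":
--                 client_max_window_bits = int(value)
--             elif key == "server_max_window_bits":
--                 server_max_window_bits = int(value)
--         elif token == "client_no_context_takeover":
--             client_no_context_takeover = True
--         elif token == "server_no_context_takeover":
--             server_no_context_takeover = True
--
--     return (
--         client_no_context_takeover,
--         server_no_context_takeover,
--         client_max_window_bits,
--         server_max_window_bits,
--     )
-- ===== SOURCE B (Python) =====
-- def parse_deflate_params(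
--     extension_str: str,
-- ) -> tuple[bool, bool, int, int]:
--     """Staged extraction: strip tokens once, then answer each field independently."""
--     tokens = [part.strip() for part in extension_str.split(";")]
--
--     def window_bits(name):
--         # last assignment wins in the header, so scan from the end and stop at the first hit
--         for token in reversed(tokens):
--             if "=" in token:
--                 key, value = token.split("=", 1)
--                 if key.strip() == name:
--                     return int(value.strip())
--         return 15
--
--     return (
--         "client_no_context_takeover" in tokens,
--         "server_no_context_takeover" in tokens,
--         window_bits("client_max_window_bits"),
--         window_bits("server_max_window_bits"),
--     )
-- ===== Notes on version B (the rewrite author's own statement) =====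
-- stated objective: alternative
-- what changed: A threads four mutable result variables through one stateful pass with per-parameter branching; B has no stateful loop at all: it strips the tokens once, answers the two flags by plain list membership, and answers each window-bits field by an independent reverse scan that early-returns at the first (i.e. last-wins) matching key.
import Mathlib
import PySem

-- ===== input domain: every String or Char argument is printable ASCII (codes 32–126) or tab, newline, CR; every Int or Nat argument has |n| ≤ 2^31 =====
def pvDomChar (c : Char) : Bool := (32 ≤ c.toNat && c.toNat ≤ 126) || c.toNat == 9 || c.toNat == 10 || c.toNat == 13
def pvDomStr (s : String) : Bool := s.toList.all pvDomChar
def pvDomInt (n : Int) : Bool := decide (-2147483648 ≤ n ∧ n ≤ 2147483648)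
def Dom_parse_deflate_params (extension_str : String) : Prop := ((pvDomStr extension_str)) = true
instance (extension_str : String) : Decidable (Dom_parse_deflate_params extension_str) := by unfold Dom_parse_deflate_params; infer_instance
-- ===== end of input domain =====

-- B replaces A's single stateful pass (four mutable variables, per-parameter branching) by
-- staged extraction: strip tokens once, flags by list membership, each window-bits field by an
-- independent reverse scan with early return (last-wins); objective: alternative decomposition.


-- ===== PORT A =====
-- per-parameter branching of A's loop body, on the stripped token
def pvStepACore (st : Bool × Bool × Int × Int) (token : String) : Bool × Bool × Int × Int :=
  if PySem.Str.lower token == "permessage-deflate" || token == "" then st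
  else if PySem.Str.isIn "=" token then
    match PySem.Str.splitMax? token "=" 1 with
    | some (k :: v :: _) =>
      let key := PySem.Str.strip k
      let value := PySem.Str.strip v
      if key == "client_max_window_bits" then
        match PySem.Int.ofStr? value with       -- none = ValueError, excluded by Pre_
        | some n => (st.1, st.2.1, n, st.2.2.2)
        | none => st
      else if key == "server_max_window_bits" then
        match PySem.Int.ofStr? value with       -- none = ValueError, excluded by Pre_
        | some n => (st.1, st.2.1, st.2.2.1, n)
        | none => st
      else st
    | _ => st                                    -- unreachable: "=" ∈ token gives two parts
  else if token == "client_no_context_takeover" then (true, st.2.1, st.2.2.1, st.2.2.2)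
  else if token == "server_no_context_takeover" then (st.1, true, st.2.2.1, st.2.2.2)
  else st

-- loop body of A: token = raw_part.strip(), then per-parameter branching (pvStepACore)
def pvStepA (st : Bool × Bool × Int × Int) (raw_part : String) : Bool × Bool × Int × Int :=
  pvStepACore st (PySem.Str.strip raw_part)

def parse_deflate_params (extension_str : String) : Bool × Bool × Int × Int :=
  ((PySem.Str.split? extension_str ";").getD []).foldl pvStepA (false, false, 15, 15)

-- ===== PORT B =====
-- B's inner 'window_bits(name)': walk the (already reversed) token list, early-return int(value)
-- at the first key=value token whose key strips to name, else 15
def pvWindowBits (name : String) : List String → Int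
  | [] => 15
  | token :: rest =>
    if PySem.Str.isIn "=" token then
      match PySem.Str.splitMax? token "=" 1 with
      | some (k :: v :: _) =>
        if PySem.Str.strip k == name then (PySem.Int.ofStr? (PySem.Str.strip v)).getD 15
          -- getD: Pre_ guarantees int() succeeds here
        else pvWindowBits name rest
      | _ => pvWindowBits name rest              -- unreachable: "=" ∈ token gives two parts
    else pvWindowBits name rest

def parse_deflate_params_alt (extension_str : String) : Bool × Bool × Int × Int :=
  let tokens := ((PySem.Str.split? extension_str ";").getD []).map PySem.Str.strip
  ( tokens.contains "client_no_context_takeover",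
    tokens.contains "server_no_context_takeover",
    pvWindowBits "client_max_window_bits" tokens.reverse,
    pvWindowBits "server_max_window_bits" tokens.reverse )

-- ===== PRECONDITION & SPEC =====
-- a token is fine unless it is a window-bits key=value whose value int() rejects (ValueError in A)
def pvTokenOKCore (token : String) : Bool :=
  if PySem.Str.lower token == "permessage-deflate" || token == "" then true
  else if PySem.Str.isIn "=" token then
    match PySem.Str.splitMax? token "=" 1 with
    | some (k :: v :: _) =>
      let key := PySem.Str.strip k
      if key == "client_max_window_bits" || key == "server_max_window_bits" then
        (PySem.Int.ofStr? (PySem.Str.strip v)).isSome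
      else true
    | _ => true
  else true

def pvTokenOK (raw_part : String) : Bool := pvTokenOKCore (PySem.Str.strip raw_part)

-- Pre_ excludes exactly the inputs on which A raises ValueError: some client/server_max_window_bits
-- token whose value is not a valid int literal.
def Pre_parse_deflate_params (extension_str : String) : Prop :=
  ((PySem.Str.split? extension_str ";").getD []).all pvTokenOK = true
instance (extension_str : String) : Decidable (Pre_parse_deflate_params extension_str) := by
  unfold Pre_parse_deflate_params; infer_instance

def pvWitness_parse_deflate_params : String :=
  "permessage-deflate; client_no_context_takeover; server_max_window_bits= 10 ; x=y"

def Spec_parse_deflate_params (extension_str : String) (out : Bool × Bool × Int × Int) : Prop := out = parse_deflate_params_alt extension_str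
instance (extension_str : String) (out : Bool × Bool × Int × Int) : Decidable (Spec_parse_deflate_params extension_str out) := by unfold Spec_parse_deflate_params; infer_instance

-- ===== CLAIM (what is proved, stated in full; the proofs are below) =====
def Claim_equal_parse_deflate_params : Prop := ∀ (extension_str : String), Dom_parse_deflate_params extension_str → Pre_parse_deflate_params extension_str → Spec_parse_deflate_params extension_str (parse_deflate_params extension_str)

-- ===== LEMMAS AND PROOFS =====

-- a token whose lower-case form is "permessage-deflate" contains no '='
theorem pv_pmd_no_eq (t : String) (h : PySem.Str.lower t = "permessage-deflate") :
    PySem.Str.isIn "=" t = false := by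
  rw [← Bool.not_eq_true, PySem.Str.isIn_iff_infix]
  intro hinf
  have hm : '=' ∈ t.toList :=
    (List.singleton_infix_iff '=' t.toList).mp (by simpa using hinf)
  have hm2 : PySem.Chars.lowerChar '=' ∈ (PySem.Str.lower t).toList := by
    rw [PySem.Str.toList_lower]
    exact List.mem_map_of_mem hm
  rw [h] at hm2
  revert hm2; decide

-- a token whose lower-case form is "permessage-deflate" is not a flag token
theorem pv_pmd_not_flag (t f : String) (hf : PySem.Str.lower f ≠ "permessage-deflate")
    (h : PySem.Str.lower t = "permessage-deflate") : (t == f) = false := by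
  simp only [beq_eq_false_iff_ne]
  intro he; exact hf (he ▸ h)

-- a token containing '=' is not a flag token (the flag literals contain no '=')
theorem pv_eq_not_flag (t f : String) (hf : PySem.Str.isIn "=" f = false)
    (h : PySem.Str.isIn "=" t = true) : (t == f) = false := by
  simp only [beq_eq_false_iff_ne]
  intro he; rw [he, hf] at h; cases h

-- symmetric form of a failed flag comparison
theorem pv_beq_symm_false (t f : String) (h : (t == f) = false) : (f == t) = false := by
  simp only [beq_eq_false_iff_ne] at h ⊢
  exact h.symm

-- main invariant: A's fold from the left equals B's staged reads, by induction from the RIGHT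
theorem pv_inv (rs : List String) (hok : ∀ r ∈ rs, pvTokenOK r = true) :
    rs.foldl pvStepA (false, false, 15, 15) =
      ( (rs.map PySem.Str.strip).contains "client_no_context_takeover",
        (rs.map PySem.Str.strip).contains "server_no_context_takeover",
        pvWindowBits "client_max_window_bits" (rs.map PySem.Str.strip).reverse,
        pvWindowBits "server_max_window_bits" (rs.map PySem.Str.strip).reverse ) := by
  induction rs using List.reverseRecOn with
  | nil => simp [List.foldl, pvWindowBits]
  | append_singleton rs r ih =>
    obtain ⟨t, ht⟩ : ∃ t, PySem.Str.strip r = t := ⟨_, rfl⟩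
    have hokr : pvTokenOKCore t = true := by
      have := hok r (by simp)
      unfold pvTokenOK at this
      rwa [ht] at this
    have ihr := ih (fun u hu => hok u (by simp [hu]))
    rw [List.foldl_append, ihr]
    simp only [List.map_append, List.reverse_append, List.map_cons, List.map_nil,
      List.reverse_cons, List.reverse_nil, List.nil_append, List.cons_append,
      List.contains_append, List.contains_cons, List.contains_nil, List.foldl, ht]
    unfold pvStepA pvStepACore
    rw [ht]
    by_cases h0 : (PySem.Str.lower t == "permessage-deflate" || t == "") = true
    · -- skipped token: empty or "permessage-deflate"; it has no '=' and is no flag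
      rw [if_pos h0]
      rcases Bool.or_eq_true_iff.mp h0 with hp | he
      · have hp' : PySem.Str.lower t = "permessage-deflate" := by simpa using hp
        have hne : PySem.Str.isIn "=" t = false := pv_pmd_no_eq t hp'
        rw [pvWindowBits, pvWindowBits, if_neg (by simpa using hne),
          if_neg (by simpa using hne)]
        simp [pv_beq_symm_false _ _ (pv_pmd_not_flag t "client_no_context_takeover" (by decide) hp'),
          pv_beq_symm_false _ _ (pv_pmd_not_flag t "server_no_context_takeover" (by decide) hp')]
      · have he' : t = "" := by simpa using he
        subst he'
        rw [pvWindowBits, pvWindowBits, if_neg (by decide), if_neg (by decide)]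
        simp
    · by_cases hin : PySem.Str.isIn "=" t = true
      · -- key=value token; it is no flag (the flag names contain no '=')
        have hfc := pv_beq_symm_false _ _ (pv_eq_not_flag t "client_no_context_takeover" (by decide) hin)
        have hfs := pv_beq_symm_false _ _ (pv_eq_not_flag t "server_no_context_takeover" (by decide) hin)
        rw [if_neg h0, if_pos hin,
          pvWindowBits, pvWindowBits, if_pos hin, if_pos hin]
        rcases hs : PySem.Str.splitMax? t "=" 1 with _ | ⟨_ | ⟨k, _ | ⟨v, rest⟩⟩⟩ <;>
          dsimp only
        · simp [hfc, hfs]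
        · simp [hfc, hfs]
        · simp [hfc, hfs]
        · have hysome : (PySem.Str.strip k == "client_max_window_bits"
                || PySem.Str.strip k == "server_max_window_bits") = true →
              (PySem.Int.ofStr? (PySem.Str.strip v)).isSome = true := by
            intro hk
            have := hokr
            unfold pvTokenOKCore at this
            rw [if_neg h0, if_pos hin, hs] at this
            dsimp only at this
            rwa [if_pos hk] at this
          by_cases hk1 : (PySem.Str.strip k == "client_max_window_bits") = true
          · rcases Option.isSome_iff_exists.mp (hysome (by simp [hk1])) with ⟨n, hn⟩
            have hk2 : (PySem.Str.strip k == "server_max_window_bits") = false := by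
              have hkeq : PySem.Str.strip k = "client_max_window_bits" := by simpa using hk1
              rw [hkeq]; decide
            rw [if_pos hk1, if_pos hk1, if_neg (by simp [hk2]), hn]
            simp [hfc, hfs]
          · by_cases hk2 : (PySem.Str.strip k == "server_max_window_bits") = true
            · rcases Option.isSome_iff_exists.mp (hysome (by simp [hk2])) with ⟨n, hn⟩
              rw [if_neg hk1, if_neg hk1, if_pos hk2, if_pos hk2, hn]
              simp [hfc, hfs]
            · rw [if_neg hk1, if_neg hk1, if_neg hk2, if_neg hk2]
              simp [hfc, hfs]
      · -- flag or unknown bare token: no '=', so both window scans skip it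
        rw [if_neg h0, if_neg hin,
          pvWindowBits, pvWindowBits, if_neg hin, if_neg hin]
        by_cases hf1 : (t == "client_no_context_takeover") = true
        · have ht1 : t = "client_no_context_takeover" := by simpa using hf1
          subst ht1
          rw [if_pos (by decide)]
          simp
        · by_cases hf2 : (t == "server_no_context_takeover") = true
          · have ht2 : t = "server_no_context_takeover" := by simpa using hf2
            subst ht2
            rw [if_neg (by decide), if_pos (by decide)]
            simp
          · rw [if_neg hf1, if_neg hf2]
            simp [pv_beq_symm_false _ _ (Bool.eq_false_iff.mpr hf1),
              pv_beq_symm_false _ _ (Bool.eq_false_iff.mpr hf2)]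

-- ===== VERDICT (by name: the statement is the Claim_ definition above) =====
theorem parse_deflate_params_spec : Claim_equal_parse_deflate_params := by
  intro s _ hpre
  unfold Spec_parse_deflate_params parse_deflate_params parse_deflate_params_alt
  exact pv_inv ((PySem.Str.split? s ";").getD [])
    (fun t ht => List.all_eq_true.mp hpre t ht)
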